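-- pv_equiv track=rewrite | github.com/nobaksan/musinsaigo | utils/torch_utils.py | convert_name_to_safetensors
-- ===== SOURCE A (Python) =====
-- LORA_PREFIX_UNET = "lora_unet"
--
-- def convert_name_to_safetensors(name: str) -> str:
--     parts = name.split(".")
--
--     for i in range(len(parts)):
--         if parts[i].isdigit():
--             parts[i] = "_" + parts[i]
--         if "to" in parts[i] and "lora" in parts[i]:
--             parts[i] = parts[i].replace("_lora", ".lora")
--
--     new_parts = []
--     for i in range(len(parts)):
--         if i == 0:
--             new_parts.append(LORA_PREFIX_UNET + "_" + parts[i])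
--         elif i == len(parts) - 2:
--             new_parts.append(parts[i] + "_to_" + parts[i + 1])
--             new_parts[-1] = new_parts[-1].replace("_to_weight", "")
--         elif i == len(parts) - 1:
--             new_parts[-1] += "." + parts[i]
--         elif parts[i] != "processor":
--             new_parts.append(parts[i])
--
--     new_name = "_".join(new_parts)
--     new_name = new_name.replace("__", "_")
--     new_name = new_name.replace("_to_out.", "_to_out_0.")
--     return new_name
-- ===== SOURCE B (Python) =====
-- LORA_PREFIX_UNET = "lora_unet"
--
-- def _fix(p: str) -> str:
--     if p.isdigit():
--         p = "_" + p
--     if "to" in p and "lora" in p: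
--         p = p.replace("_lora", ".lora")
--     return p
--
-- def _go(ps):
--     # recursively render positions 1.. of a >=3-part name as a "_"-joined string,
--     # normalizing each part on the way; the last two parts become the fused tail
--     if len(ps) == 2:
--         x, y = _fix(ps[0]), _fix(ps[1])
--         return (x + "_to_" + y).replace("_to_weight", "") + "." + y
--     p = _fix(ps[0])
--     rest = _go(ps[1:])
--     return rest if p == "processor" else p + "_" + rest
--
-- def convert_name_to_safetensors(name: str) -> str:
--     ps = name.split(".")
--     head = LORA_PREFIX_UNET + "_" + _fix(ps[0])
--     if len(ps) == 1:
--         s = head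
--     elif len(ps) == 2:
--         s = head + "." + _fix(ps[1])
--     else:
--         s = head + "_" + _go(ps[1:])
--     return s.replace("__", "_").replace("_to_out.", "_to_out_0.")
-- ===== Notes on version B (the rewrite author's own statement) =====
-- stated objective: alternative
-- what changed: B replaces A's two staged passes (a mutating per-part rewrite loop followed by an index-branching accumulator loop that edits new_parts[-1] in place and is then '_'-joined) by one fused recursive descent over the part list that normalizes each part on the way and concatenates the output string directly, building the last two parts into the tail at the recursion's base case.
import Mathlib
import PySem

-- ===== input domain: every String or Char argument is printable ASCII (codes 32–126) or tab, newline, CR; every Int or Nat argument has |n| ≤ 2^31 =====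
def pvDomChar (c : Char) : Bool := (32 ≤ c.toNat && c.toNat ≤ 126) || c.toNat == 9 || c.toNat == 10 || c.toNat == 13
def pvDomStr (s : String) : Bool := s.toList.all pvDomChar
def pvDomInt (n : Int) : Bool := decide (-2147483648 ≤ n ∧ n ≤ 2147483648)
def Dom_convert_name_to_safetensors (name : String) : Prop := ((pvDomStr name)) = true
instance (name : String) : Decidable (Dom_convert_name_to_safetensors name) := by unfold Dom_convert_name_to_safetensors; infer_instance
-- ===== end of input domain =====

-- B replaces A's two staged passes (per-part rewrite loop, then an index-branching
-- accumulator loop that edits new_parts[-1] in place, then a join) by one fused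
-- recursive descent that normalizes each part on the way and builds the output
-- string directly; objective: alternative (no claim of speed).

-- ===== PORT A =====
-- first loop of A: per-part rewrite (only parts[i] is read/written at step i)
def pvFixA (p : String) : String :=
  let p := if PySem.Str.strIsdigit p then "_" ++ p else p
  if PySem.Str.isIn "to" p && PySem.Str.isIn "lora" p then PySem.Str.replace p "_lora" ".lora" else p

-- new_parts[-1] = f(new_parts[-1])  (on [] Python would raise; unreachable here)
def pvMapLast (f : String → String) : List String → List String
  | [] => []
  | [x] => [f x]
  | x :: y :: rest => x :: pvMapLast f (y :: rest)

-- one iteration of A's second loop (state new_parts, element (i, parts[i]))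
def pvAStep (parts : List String) (n : Nat) (acc : List String) (ip : Int × String) : List String :=
  if ip.1 = 0 then
    acc ++ ["lora_unet" ++ "_" ++ ip.2]
  else if ip.1 = (n : Int) - 2 then
    let acc := acc ++ [ip.2 ++ "_to_" ++ (PySem.List.pyGet? parts (ip.1 + 1)).getD ""]
    pvMapLast (fun s => PySem.Str.replace s "_to_weight" "") acc
  else if ip.1 = (n : Int) - 1 then
    pvMapLast (fun s => s ++ "." ++ ip.2) acc
  else if ip.2 ≠ "processor" then
    acc ++ [ip.2]
  else
    acc

def convert_name_to_safetensors (name : String) : String :=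
  let parts := ((PySem.Str.split? name ".").getD []).map pvFixA
  let newParts := (PySem.List.enumerate parts 0).foldl (pvAStep parts parts.length) []
  let newName := PySem.Str.join "_" newParts
  let newName := PySem.Str.replace newName "__" "_"
  PySem.Str.replace newName "_to_out." "_to_out_0."

-- ===== PORT B =====
def pvFixB (p : String) : String :=
  let q := if PySem.Str.strIsdigit p then "_" ++ p else p
  if PySem.Str.isIn "to" q && PySem.Str.isIn "lora" q then PySem.Str.replace q "_lora" ".lora" else q

-- _go of Source B: fused recursive rendering of positions 1.. of a >=3-part name
def pvGo : List String → String
  | [x, y] =>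
      let fx := pvFixB x
      let fy := pvFixB y
      PySem.Str.replace (fx ++ "_to_" ++ fy) "_to_weight" "" ++ "." ++ fy
  | p :: rest =>
      let q := pvFixB p
      let r := pvGo rest
      if q = "processor" then r else q ++ "_" ++ r
  | [] => ""   -- unreachable: _go is only applied to lists of length ≥ 2

def convert_name_to_safetensors_alt (name : String) : String :=
  let ps := (PySem.Str.split? name ".").getD []
  let head := "lora_unet" ++ "_" ++ pvFixB (ps.headD "")
  let s :=
    match ps with
    | [] => head          -- unreachable: split never returns []
    | [_] => head
    | [_, y] => head ++ "." ++ pvFixB y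
    | _ :: rest => head ++ "_" ++ pvGo rest
  PySem.Str.replace (PySem.Str.replace s "__" "_") "_to_out." "_to_out_0."

-- ===== PRECONDITION & SPEC =====
def Spec_convert_name_to_safetensors (name : String) (out : String) : Prop := out = convert_name_to_safetensors_alt name
instance (name : String) (out : String) : Decidable (Spec_convert_name_to_safetensors name out) := by unfold Spec_convert_name_to_safetensors; infer_instance

-- ===== CLAIM (what is proved, stated in full; the proofs are below) =====
def Claim_equal_convert_name_to_safetensors : Prop := ∀ (name : String), Dom_convert_name_to_safetensors name → Spec_convert_name_to_safetensors name (convert_name_to_safetensors name)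

-- ===== LEMMAS AND PROOFS =====

theorem pvFix_eq : pvFixA = pvFixB := rfl

theorem splitOn_go_ne_nil (sep : List Char) (fuel : Nat) (l cur : List Char)
    (acc : List (List Char)) : PySem.Chars.splitOn.go sep fuel l cur acc ≠ [] := by
  induction fuel generalizing l cur acc with
  | zero => simp [PySem.Chars.splitOn.go]
  | succ fuel ih =>
    cases l with
    | nil => simp [PySem.Chars.splitOn.go]
    | cons c rest =>
      rw [PySem.Chars.splitOn.go]
      split
      · exact ih _ _ _
      · exact ih _ _ _

theorem split_dot_ne_nil (name : String) :
    ∃ l, PySem.Str.split? name "." = some l ∧ l ≠ [] := by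
  refine ⟨(PySem.Chars.splitOn name.toList ['.']).map String.ofList, ?_, ?_⟩
  · simp [PySem.Str.split?, PySem.Chars.split?]
  · simp only [ne_eq, List.map_eq_nil_iff]
    exact splitOn_go_ne_nil _ _ _ _ _

theorem pvMapLast_append (f : String → String) (l : List String) (t : String) :
    pvMapLast f (l ++ [t]) = l ++ [f t] := by
  induction l with
  | nil => rfl
  | cons x xs ih =>
    cases xs with
    | nil => simp [pvMapLast]
    | cons y ys => simpa [pvMapLast] using ih

theorem pvAStep_mid (parts : List String) (n : Nat) (mid : List String) (k : Int)
    (acc : List String) (hk : 1 ≤ k) (hn : k + mid.length ≤ (n : Int) - 2) :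
    (PySem.List.enumerate mid k).foldl (pvAStep parts n) acc
      = acc ++ mid.filter (fun p => p ≠ "processor") := by
  induction mid generalizing k acc with
  | nil => simp [PySem.List.enumerate]
  | cons p rest ih =>
    rw [PySem.List.enumerate_cons, List.foldl_cons]
    have hlen : (0 : Int) ≤ rest.length := by positivity
    have h0 : ¬ (k = 0) := by omega
    simp only [List.length_cons, Nat.cast_add, Nat.cast_one] at hn
    have h2 : ¬ (k = (n : Int) - 2) := by omega
    have h1 : ¬ (k = (n : Int) - 1) := by omega
    by_cases hp : p = "processor"
    · rw [show pvAStep parts n acc (k, p) = acc by simp [pvAStep, h0, h2, h1, hp]]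
      rw [ih (k + 1) acc (by omega) (by omega)]
      simp [hp]
    · rw [show pvAStep parts n acc (k, p) = acc ++ [p] by simp [pvAStep, h0, h2, h1, hp]]
      rw [ih (k + 1) (acc ++ [p]) (by omega) (by omega)]
      simp [hp]

theorem pyGet?_mid2 (fa fx fy : String) (FM : List String) :
    PySem.List.pyGet? (fa :: (FM ++ [fx, fy])) (1 + (FM.length : Int) + 1) = some fy := by
  have h : (1 + (FM.length : Int) + 1) = ((FM.length + 2 : Nat) : Int) := by push_cast; ring
  rw [h, PySem.List.pyGet?_natCast]
  simp

theorem pvA_loop (fa fx fy : String) (FM : List String) :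
    List.foldl (pvAStep (fa :: (FM ++ [fx, fy])) (fa :: (FM ++ [fx, fy])).length) []
        (PySem.List.enumerate (fa :: (FM ++ [fx, fy])) 0)
      = ("lora_unet" ++ "_" ++ fa) ::
          (FM.filter (fun p => decide (p ≠ "processor")) ++
            [PySem.Str.replace (fx ++ "_to_" ++ fy) "_to_weight" "" ++ "." ++ fy]) := by
  have h : (fa :: (FM ++ [fx, fy])).length = FM.length + 3 := by simp
  rw [PySem.List.enumerate_cons, List.foldl_cons]
  rw [show pvAStep (fa :: (FM ++ [fx, fy])) (fa :: (FM ++ [fx, fy])).length [] (0, fa)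
        = ["lora_unet" ++ "_" ++ fa] by simp [pvAStep]]
  rw [PySem.List.enumerate_append, List.foldl_append, zero_add]
  rw [pvAStep_mid (fa :: (FM ++ [fx, fy])) (fa :: (FM ++ [fx, fy])).length FM 1
        ["lora_unet" ++ "_" ++ fa] (by norm_num) (by rw [h]; push_cast; omega)]
  rw [PySem.List.enumerate_cons, PySem.List.enumerate_cons, PySem.List.enumerate_nil]
  simp only [List.foldl_cons, List.foldl_nil]
  have hstep1 : pvAStep (fa :: (FM ++ [fx, fy])) (fa :: (FM ++ [fx, fy])).length
        (["lora_unet" ++ "_" ++ fa] ++ FM.filter (fun p => decide (p ≠ "processor")))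
        (1 + FM.length, fx)
      = (["lora_unet" ++ "_" ++ fa] ++ FM.filter (fun p => decide (p ≠ "processor")))
          ++ [PySem.Str.replace (fx ++ "_to_" ++ fy) "_to_weight" ""] := by
    unfold pvAStep
    rw [if_neg (by omega), if_pos (by rw [h]; push_cast; ring)]
    rw [pyGet?_mid2, Option.getD_some, pvMapLast_append]
  rw [hstep1]
  have hstep2 : pvAStep (fa :: (FM ++ [fx, fy])) (fa :: (FM ++ [fx, fy])).length
        ((["lora_unet" ++ "_" ++ fa] ++ FM.filter (fun p => decide (p ≠ "processor")))
          ++ [PySem.Str.replace (fx ++ "_to_" ++ fy) "_to_weight" ""])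
        (1 + FM.length + 1, fy)
      = (["lora_unet" ++ "_" ++ fa] ++ FM.filter (fun p => decide (p ≠ "processor")))
          ++ [PySem.Str.replace (fx ++ "_to_" ++ fy) "_to_weight" "" ++ "." ++ fy] := by
    unfold pvAStep
    rw [if_neg (by omega), if_neg (by rw [h]; push_cast; omega), if_pos (by rw [h]; push_cast; ring)]
    rw [pvMapLast_append]
  rw [hstep2]
  simp

theorem str_join_cons (h b : String) (l : List String) :
    PySem.Str.join "_" (h :: b :: l) = h ++ "_" ++ PySem.Str.join "_" (b :: l) := by
  have h0 : "_".toList = ['_'] := rfl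
  have h1 : ['_'].intercalate (h.toList :: b.toList :: List.map String.toList l)
      = h.toList ++ ['_'] ++ ['_'].intercalate (b.toList :: List.map String.toList l) := by
    simp [List.intercalate, List.intersperse]
  have h2 : String.ofList ['_'] = "_" := rfl
  show String.ofList ("_".toList.intercalate (List.map String.toList (h :: b :: l)))
      = h ++ "_" ++ String.ofList ("_".toList.intercalate (List.map String.toList (b :: l)))
  rw [h0, List.map_cons, List.map_cons, h1, String.ofList_append, String.ofList_append,
    h2, String.ofList_toList]

theorem str_join_singleton (t : String) : PySem.Str.join "_" [t] = t := by
  show String.ofList ("_".toList.intercalate (List.map String.toList [t])) = t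
  simp [List.intercalate, String.ofList_toList]

theorem str_join_cons_ne (h : String) (l : List String) (hl : l ≠ []) :
    PySem.Str.join "_" (h :: l) = h ++ "_" ++ PySem.Str.join "_" l := by
  cases l with
  | nil => exact absurd rfl hl
  | cons b t => exact str_join_cons h b t

-- B's recursion equals the "_"-join of the filtered normalized middles plus the tail
theorem pvGo_eq (M : List String) (x y : String) :
    pvGo (M ++ [x, y]) = PySem.Str.join "_"
      ((M.map pvFixB).filter (fun p => decide (p ≠ "processor")) ++
        [PySem.Str.replace (pvFixB x ++ "_to_" ++ pvFixB y) "_to_weight" "" ++ "." ++ pvFixB y]) := by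
  induction M with
  | nil =>
    simp only [List.nil_append, List.map_nil, List.filter_nil]
    rw [str_join_singleton]
    rfl
  | cons p M ih =>
    have hshape : ∃ a b t, M ++ [x, y] = a :: b :: t := by
      cases M with
      | nil => exact ⟨x, y, [], rfl⟩
      | cons m M' =>
        cases M' with
        | nil => exact ⟨m, x, [y], rfl⟩
        | cons m' M'' => exact ⟨m, m', M'' ++ [x, y], by simp⟩
    obtain ⟨a, b, t, hab⟩ := hshape
    have hGo : pvGo (p :: (M ++ [x, y]))
        = if pvFixB p = "processor" then pvGo (M ++ [x, y])
          else pvFixB p ++ "_" ++ pvGo (M ++ [x, y]) := by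
      rw [hab]; rfl
    rw [List.cons_append, hGo, ih]
    by_cases hp : pvFixB p = "processor"
    · simp [hp]
    · rw [if_neg hp]
      rw [List.map_cons, List.filter_cons_of_pos (by simpa using hp), List.cons_append,
        str_join_cons_ne _ _ (by simp)]

-- ===== VERDICT (by name: the statement is the Claim_ definition above) =====
theorem convert_name_to_safetensors_spec : Claim_equal_convert_name_to_safetensors := by
  intro name _
  unfold Spec_convert_name_to_safetensors
  unfold convert_name_to_safetensors convert_name_to_safetensors_alt
  obtain ⟨l, hl, hne⟩ := split_dot_ne_nil name
  rw [hl]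
  simp only [Option.getD_some]
  rcases l with _ | ⟨a, rest⟩
  · exact absurd rfl hne
  rcases rest.eq_nil_or_concat with rfl | ⟨L, y, rfl⟩
  · -- single part
    simp [PySem.List.enumerate_cons, PySem.List.enumerate_nil, pvAStep, pvFix_eq,
      str_join_singleton]
  rcases L.eq_nil_or_concat with rfl | ⟨M, x, rfl⟩
  · -- two parts
    simp [PySem.List.enumerate_cons, PySem.List.enumerate_nil, pvAStep, pvMapLast,
      pvFix_eq, str_join_singleton]
  · -- three or more parts
    simp only [List.concat_eq_append, List.map_append, List.map_cons, List.map_nil,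
      List.cons_append, List.nil_append, List.append_assoc]
    rw [pvA_loop (pvFixA a) (pvFixA x) (pvFixA y) (M.map pvFixA)]
    rw [str_join_cons_ne _ _ (by simp)]
    have hshape : ∃ c d t, M ++ [x, y] = c :: d :: t := by
      cases M with
      | nil => exact ⟨x, y, [], rfl⟩
      | cons m M' =>
        cases M' with
        | nil => exact ⟨m, x, [y], rfl⟩
        | cons m' M'' => exact ⟨m, m', M'' ++ [x, y], by simp⟩
    obtain ⟨c, d, t, hcd⟩ := hshape
    have hmatch : (match a :: (M ++ [x, y]) with
        | [] => "lora_unet" ++ "_" ++ pvFixB ((a :: (M ++ [x, y])).headD "")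
        | [_] => "lora_unet" ++ "_" ++ pvFixB ((a :: (M ++ [x, y])).headD "")
        | [_, y'] => "lora_unet" ++ "_" ++ pvFixB ((a :: (M ++ [x, y])).headD "") ++ "." ++ pvFixB y'
        | _ :: rest => "lora_unet" ++ "_" ++ pvFixB ((a :: (M ++ [x, y])).headD "") ++ "_" ++ pvGo rest)
        = "lora_unet" ++ "_" ++ pvFixB a ++ "_" ++ pvGo (M ++ [x, y]) := by
      rw [hcd]; rfl
    rw [pvGo_eq, ← pvFix_eq] at *
    simp only [List.headD_cons] at hmatch ⊢
    rw [hmatch]
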